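-- pv_equiv track=rewrite | github.com/RaymanPython/SetCelculetPyQt5 | main.py | split
-- ===== SOURCE A (Python) =====
-- def split(s, b):
--     a = []
--     k = ''
--     s1 = ''
--     s = s + '*'
--     c = True
--     for i in s:
--         if i not in b:
--             k += i
--             if c:
--                 s1 += '('
--                 c = False
--         else:
--             if k != '':
--                 s1 += "'" + k + "'"
--                 if k != 'True' and k != 'False':
--                     a.append(k)
--                 k = ''
--                 if not c:
--                     c = True
--                     s1 += ')'
--             s1 += i
--     s1 = s1[0:-1]
--     return a, s1
-- ===== SOURCE B (Python) =====
-- def split(s, b):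
--     # Phase 1: group s+'*' into maximal runs of operand / delimiter characters.
--     groups = []  # list of [is_operand, list_of_chars]
--     for ch in s + '*':
--         op = ch not in b
--         if groups and groups[-1][0] == op:
--             groups[-1][1].append(ch)
--         else:
--             groups.append([op, [ch]])
--     # Phase 2: format each run; an operand run is flushed only when it is not last.
--     a = []
--     parts = []
--     last = len(groups) - 1
--     for idx, (op, chars) in enumerate(groups):
--         run = ''.join(chars)
--         if op:
--             parts.append('(')
--             if idx != last:
--                 parts.append("'" + run + "')")
--                 if run != 'True' and run != 'False':
--                     a.append(run)
--         else:
--             parts.append(run)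
--     return a, ''.join(parts)[:-1]
-- ===== Notes on version B (the rewrite author's own statement) =====
-- stated objective: idiomatic
-- what changed: A's char-by-char flag-based state machine is replaced by a two-phase pass: first group s+'*' into maximal operand/delimiter runs, then format each run (flushing an operand run only when it is not the last group).
import Mathlib
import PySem

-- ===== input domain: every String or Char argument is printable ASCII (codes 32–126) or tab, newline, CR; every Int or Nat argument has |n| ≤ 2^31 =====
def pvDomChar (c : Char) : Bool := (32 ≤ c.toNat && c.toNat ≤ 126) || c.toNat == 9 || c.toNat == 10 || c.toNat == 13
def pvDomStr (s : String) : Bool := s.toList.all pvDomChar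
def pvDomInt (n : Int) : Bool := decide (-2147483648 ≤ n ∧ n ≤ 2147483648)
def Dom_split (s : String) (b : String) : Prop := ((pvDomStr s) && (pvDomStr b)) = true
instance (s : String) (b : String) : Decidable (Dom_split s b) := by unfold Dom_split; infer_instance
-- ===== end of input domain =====

-- B replaces A's char-by-char flag state machine by a two-phase pass (group into runs,
-- then format each run); objective: idiomatic/alternative, same behaviour incl. the
-- trailing-'*' sentinel and final [:-1] slice.

-- ===== PORT A =====
-- state (a, k, s1, c); strings built as List Char, joined with String.ofList at the end
def splitStep (bl : List Char) (st : List String × List Char × List Char × Bool) (i : Char) :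
    List String × List Char × List Char × Bool :=
  let (a, k, s1, c) := st
  if !(bl.contains i) then                 -- if i not in b
    let k' := k ++ [i]
    if c then (a, k', s1 ++ ['('], false) else (a, k', s1, c)
  else
    if k ≠ [] then
      let s1' := s1 ++ '\'' :: k ++ ['\'']
      let a' := if k ≠ "True".toList ∧ k ≠ "False".toList then a ++ [String.ofList k] else a
      if !c then (a', [], s1' ++ [')'] ++ [i], true)
      else (a', [], s1' ++ [i], c)
    else (a, k, s1 ++ [i], c)

def split (s : String) (b : String) : List String × String :=
  let r := (s ++ "*").toList.foldl (splitStep b.toList) ([], [], [], true)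
  (r.1, String.ofList (PySem.List.slice r.2.2.1 (some 0) (some (-1))))   -- s1[0:-1]

-- ===== PORT B =====
-- append ch to the last group if it has the same kind, else start a new group at the end
def pushCh (op : Bool) (ch : Char) : List (Bool × List Char) → List (Bool × List Char)
  | [] => [(op, [ch])]
  | [(o, r)] => if o = op then [(o, r ++ [ch])] else [(o, r), (op, [ch])]
  | g :: g' :: rest => g :: pushCh op ch (g' :: rest)

-- format the groups: an operand run is flushed only when it is not the last group
def emit : List (Bool × List Char) → List String × List Char
  | [] => ([], [])
  | (op, r) :: rest =>
    let (a2, p2) := emit rest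
    if op then
      if rest.isEmpty then (a2, '(' :: p2)
      else
        let a' := if r ≠ "True".toList ∧ r ≠ "False".toList then String.ofList r :: a2 else a2
        (a', ('(' :: '\'' :: r ++ ['\'', ')']) ++ p2)
    else (a2, r ++ p2)

def split_alt (s : String) (b : String) : List String × String :=
  let gs := (s ++ "*").toList.foldl (fun gs ch => pushCh (!(b.toList.contains ch)) ch gs) []
  let r := emit gs
  (r.1, String.ofList (PySem.List.slice r.2 (some 0) (some (-1))))       -- ''.join(parts)[:-1]

-- ===== PRECONDITION & SPEC =====
def Spec_split (s : String) (b : String) (out : List String × String) : Prop := out = split_alt s b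
instance (s : String) (b : String) (out : List String × String) : Decidable (Spec_split s b out) := by unfold Spec_split; infer_instance

-- ===== CLAIM (what is proved, stated in full; the proofs are below) =====
def Claim_equal_split : Prop := ∀ (s : String) (b : String), Dom_split s b → Spec_split s b (split s b)

-- ===== LEMMAS AND PROOFS =====

-- pending operand run: the run of the last group when it is an operand group, else ''
def kOf : List (Bool × List Char) → List Char
  | [] => []
  | [(o, r)] => if o then r else []
  | _ :: g' :: rest => kOf (g' :: rest)

-- A's loop state as a function of B's groups
def invState (gs : List (Bool × List Char)) : List String × List Char × List Char × Bool :=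
  ((emit gs).1, kOf gs, (emit gs).2, (kOf gs).isEmpty)

theorem step_prefix (bl : List Char) (ch : Char) (ha : List String) (hs : List Char)
    (a : List String) (k s1 : List Char) (c : Bool) :
    splitStep bl (ha ++ a, k, hs ++ s1, c) ch =
      ((ha ++ (splitStep bl (a, k, s1, c) ch).1, (splitStep bl (a, k, s1, c) ch).2.1,
        hs ++ (splitStep bl (a, k, s1, c) ch).2.2.1, (splitStep bl (a, k, s1, c) ch).2.2.2)) := by
  simp only [splitStep]
  split_ifs <;> simp

theorem pushCh_ne (op : Bool) (ch : Char) (gs : List (Bool × List Char))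
    (h : ∀ g ∈ gs, g.2 ≠ []) : ∀ g ∈ pushCh op ch gs, g.2 ≠ [] := by
  induction gs with
  | nil => simp [pushCh]
  | cons g tail ih =>
    cases tail with
    | nil =>
      obtain ⟨o, r⟩ := g
      have hr : r ≠ [] := h (o, r) (by simp)
      intro x hx
      simp only [pushCh] at hx
      split_ifs at hx
      · simp only [List.mem_singleton] at hx
        subst hx; simp
      · rcases (by simpa using hx : x = (o, r) ∨ x = (op, [ch])) with rfl | rfl
        · exact hr
        · simp
    | cons g' rest =>
      intro x hx
      simp only [pushCh, List.mem_cons] at hx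
      rcases hx with rfl | hx
      · exact h _ (by simp)
      · exact ih (fun g hg => h g (List.mem_cons_of_mem _ hg)) _ hx

theorem step_push (bl : List Char) (ch : Char) (gs : List (Bool × List Char))
    (hne : ∀ g ∈ gs, g.2 ≠ []) :
    splitStep bl (invState gs) ch = invState (pushCh (!(bl.contains ch)) ch gs) := by
  induction gs with
  | nil =>
    by_cases hc : ch ∈ bl <;>
      simp [invState, splitStep, pushCh, emit, kOf, hc]
  | cons g tail ih =>
    cases tail with
    | nil =>
      obtain ⟨o, r⟩ := g
      have hr : r ≠ [] := hne (o, r) (by simp)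
      by_cases hc : ch ∈ bl
      · cases o with
        | false => simp [invState, splitStep, pushCh, emit, kOf, hc]
        | true =>
          by_cases htf : r ≠ ['T','r','u','e'] ∧ r ≠ ['F','a','l','s','e']
          · simp [invState, splitStep, pushCh, emit, kOf, hc, hr, htf]
          · have htf' : r = ['T','r','u','e'] ∨ r = ['F','a','l','s','e'] := by tauto
            rcases htf' with rfl | rfl <;>
              simp [invState, splitStep, pushCh, emit, kOf, hc]
      · cases o with
        | false => simp [invState, splitStep, pushCh, emit, kOf, hc]
        | true =>
          obtain ⟨x, xs, rfl⟩ := List.exists_cons_of_ne_nil hr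
          simp [invState, splitStep, pushCh, emit, kOf, hc]
    | cons g' rest =>
      obtain ⟨o, r⟩ := g
      have htail : ∀ g ∈ g' :: rest, (g : Bool × List Char).2 ≠ [] :=
        fun g hg => hne g (List.mem_cons_of_mem _ hg)
      have ihx := ih htail
      obtain ⟨gp, gsrest, hgs⟩ : ∃ gp gsrest,
          pushCh (!(bl.contains ch)) ch (g' :: rest) = gp :: gsrest := by
        have hpush_ne : pushCh (!(bl.contains ch)) ch (g' :: rest) ≠ [] := by
          obtain ⟨o', r'⟩ := g'
          cases rest with
          | nil => simp only [pushCh]; split_ifs <;> simp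
          | cons x xs => simp [pushCh]
        cases hh : pushCh (!(bl.contains ch)) ch (g' :: rest) with
        | nil => exact absurd hh hpush_ne
        | cons gp gsrest => exact ⟨gp, gsrest, rfl⟩
      have h1 : invState (pushCh (!(bl.contains ch)) ch ((o, r) :: g' :: rest)) =
          invState ((o, r) :: pushCh (!(bl.contains ch)) ch (g' :: rest)) := by
        simp [pushCh]
      rw [h1]
      -- head contribution of the group (o, r) when the tail is nonempty
      have peel : ∀ (ts : List (Bool × List Char)) (tp : Bool × List Char) (trest : List (Bool × List Char)),
          ts = tp :: trest →
          invState ((o, r) :: ts) =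
            ((if o then (if r ≠ ['T','r','u','e'] ∧ r ≠ ['F','a','l','s','e'] then [String.ofList r] else []) else []) ++ (invState ts).1,
              (invState ts).2.1,
              (if o then '(' :: '\'' :: r ++ ['\'', ')'] else r) ++ (invState ts).2.2.1,
              (invState ts).2.2.2) := by
        rintro ts tp trest rfl
        cases o <;> [skip; by_cases htf : r ≠ ['T','r','u','e'] ∧ r ≠ ['F','a','l','s','e']] <;>
          simp [invState, emit, kOf, *]
      rw [peel _ _ _ rfl, peel _ _ _ hgs, ← ihx]
      exact step_prefix bl ch _ _ _ _ _ _

theorem fold_inv (bl : List Char) (t : List Char) (gs : List (Bool × List Char))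
    (hne : ∀ g ∈ gs, g.2 ≠ []) :
    t.foldl (splitStep bl) (invState gs) =
      invState (t.foldl (fun gs ch => pushCh (!(bl.contains ch)) ch gs) gs) := by
  induction t generalizing gs with
  | nil => rfl
  | cons ch t ih =>
    simp only [List.foldl_cons]
    rw [step_push bl ch gs hne]
    exact ih _ (pushCh_ne _ _ _ hne)

-- ===== VERDICT (by name: the statement is the Claim_ definition above) =====
theorem split_spec : Claim_equal_split := by
  intro s b _
  unfold Spec_split split split_alt
  have h0 : (([], [], [], true) : List String × List Char × List Char × Bool) = invState [] := by
    simp [invState, emit, kOf]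
  rw [h0, fold_inv b.toList (s ++ "*").toList [] (by simp)]
  rfl
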